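-- pv_equiv track=rewrite | github.com/renimminer/My-Learning-Diary | day_6_子区间最大值.py | min_sum_max
-- ===== SOURCE A (Python) =====
-- def min_sum_max(l):
--     n = len(l)
--     li = []
--     count = 1
--     l.sort(reverse = True)
--     while count <= n:
--         ll = l[:count]
--         li.append(min(ll)*sum(ll))
--         count += 1
--     return max(li)
-- ===== SOURCE B (Python) =====
-- def min_sum_max(l):
--     # single pass over the descending-sorted list: the min of each prefix is its
--     # last element, so track a running sum and running best.
--     # NOTE: like A, this sorts l in place (observable side effect is identical).
--     l.sort(reverse=True)
--     s = 0
--     best = None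
--     for x in l:
--         s += x
--         v = x * s
--         if best is None or v > best:
--             best = v
--     return best
-- ===== Notes on version B (the rewrite author's own statement) =====
-- stated objective: faster
-- what changed: Replaces the per-prefix re-slicing with min()+sum() over each prefix by a single pass over the descending-sorted list keeping a running sum (the prefix minimum is just the current element), so the quadratic inner work disappears.
-- outside the precondition, e.g. on min_sum_max([]): A raises ValueError, B returns None
import Mathlib
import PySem

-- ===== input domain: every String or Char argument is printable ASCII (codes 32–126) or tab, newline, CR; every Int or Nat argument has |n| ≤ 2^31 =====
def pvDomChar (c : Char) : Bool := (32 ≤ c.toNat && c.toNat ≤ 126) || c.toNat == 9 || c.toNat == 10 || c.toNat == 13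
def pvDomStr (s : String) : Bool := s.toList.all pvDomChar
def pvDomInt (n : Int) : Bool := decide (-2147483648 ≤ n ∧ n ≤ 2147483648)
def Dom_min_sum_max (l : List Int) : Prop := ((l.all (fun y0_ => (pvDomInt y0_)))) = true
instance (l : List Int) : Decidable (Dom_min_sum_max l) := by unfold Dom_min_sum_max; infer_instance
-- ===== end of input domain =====

-- B replaces A's quadratic per-prefix min()+sum() scans by one pass with a running sum
-- over the descending-sorted list (objective: faster, asymptotic).
-- Both Pythons sort l IN PLACE; the equivalence proved here is about the return value
-- (the mutation is identical in A and B anyway).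

-- ===== PORT A =====
-- A: sort desc, then for count = 1..n take the prefix l[:count], append min*sum, return max.
-- The .getD 0 defaults on min?/max? are unreachable under Pre_ (l ≠ []): every prefix
-- and the list li are nonempty there.
def min_sum_max (l : List Int) : Int :=
  let n : Int := l.length
  let s := PySem.List.sorted l (fun x => x) true
  let li := (PySem.List.pyRange 1 (n + 1) 1).foldl
    (fun li count =>
      let ll := PySem.List.slice s none (some count)
      li ++ [(PySem.List.min? ll (fun x => x)).getD 0 * ll.sum]) ([] : List Int)
  (PySem.List.max? li (fun x => x)).getD 0

-- ===== PORT B =====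
-- B: single pass, running sum and running best (best = none until the first element);
-- best.getD 0 is unreachable under Pre_ (l ≠ []).
def min_sum_max_alt (l : List Int) : Int :=
  let s := PySem.List.sorted l (fun x => x) true
  let r := s.foldl
    (fun (acc : Int × Option Int) x =>
      let sum := acc.1 + x
      let v := x * sum
      (sum, match acc.2 with
            | none => some v
            | some b => some (if v > b then v else b))) ((0 : Int), (none : Option Int))
  r.2.getD 0

-- ===== PRECONDITION & SPEC =====
-- Pre_ excludes only the empty list, on which A raises ValueError (max of an empty sequence).
def Pre_min_sum_max (l : List Int) : Prop := l ≠ []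
instance (l : List Int) : Decidable (Pre_min_sum_max l) := by unfold Pre_min_sum_max; infer_instance
def pvWitness_min_sum_max : List Int := [3, -1, 2]

def Spec_min_sum_max (l : List Int) (out : Int) : Prop := out = min_sum_max_alt l
instance (l : List Int) (out : Int) : Decidable (Spec_min_sum_max l out) := by unfold Spec_min_sum_max; infer_instance

-- ===== CLAIM (what is proved, stated in full; the proofs are below) =====
def Claim_equal_min_sum_max : Prop := ∀ (l : List Int), Dom_min_sum_max l → Pre_min_sum_max l → Spec_min_sum_max l (min_sum_max l)

-- ===== LEMMAS AND PROOFS =====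

-- the list of values x_i * (acc + sum of the first i+1 elements), i.e. B's per-step v's
def pvVals (acc : Int) : List Int → List Int
  | [] => []
  | x :: t => x * (acc + x) :: pvVals (acc + x) t

theorem pvVals_length (acc : Int) (s : List Int) : (pvVals acc s).length = s.length := by
  induction s generalizing acc with
  | nil => rfl
  | cons x t ih => simp [pvVals, ih]

theorem pvVals_getElem (acc : Int) (s : List Int) (k : Nat) (hk : k < s.length) :
    (pvVals acc s)[k]'(by rw [pvVals_length]; exact hk) =
      s[k] * (acc + (s.take (k + 1)).sum) := by
  induction s generalizing acc k with
  | nil => simp at hk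
  | cons x t ih =>
    cases k with
    | zero => simp [pvVals]
    | succ k =>
      simp only [pvVals, List.getElem_cons_succ, List.take_succ_cons, List.sum_cons]
      rw [ih (acc + x) k (by simpa using hk)]
      ring_nf

-- on a nonincreasing list, the value of min over a nonempty prefix is the prefix's last element
theorem pv_min_take (s : List Int) (hp : s.Pairwise (fun a b => b ≤ a)) (k : Nat)
    (hk : k < s.length) :
    (PySem.List.min? (s.take (k + 1)) (fun x => x)).getD 0 = s[k] := by
  have hne : s.take (k + 1) ≠ [] := by
    intro h
    have := congrArg List.length h
    simp at this
    subst this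
    simp at hk
  obtain ⟨m, hm⟩ : ∃ m, PySem.List.min? (s.take (k + 1)) (fun x => x) = some m := by
    cases h : PySem.List.min? (s.take (k + 1)) (fun x => x) with
    | none => exact absurd ((PySem.List.min?_eq_none_iff _ _).mp h) hne
    | some m => exact ⟨m, rfl⟩
  have hmem : m ∈ s.take (k + 1) := PySem.List.min?_mem hm
  have hmin : ∀ y ∈ s.take (k + 1), m ≤ y := PySem.List.min?_isMin hm
  have hks : s[k] ∈ s.take (k + 1) := by
    have h' : k < (s.take (k + 1)).length := by simp; omega
    have := List.getElem_mem h'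
    simpa using this
  -- s[k] is ≤ every element of the prefix (nonincreasing list)
  have hlast : ∀ y ∈ s.take (k + 1), s[k] ≤ y := by
    intro y hy
    obtain ⟨j, hj, hjy⟩ := List.getElem_of_mem hy
    have hjlen : j < s.length := by
      have := hj; simp at this; omega
    have hjk : j ≤ k := by have := hj; simp at this; omega
    have : s[j]'hjlen = y := by
      rw [← hjy]; exact (List.getElem_take).symm ▸ rfl
    rcases Nat.lt_or_ge j k with hlt | hge
    · have := List.pairwise_iff_getElem.mp hp j k hjlen hk hlt
      omega
    · have hjk' : j = k := by omega
      subst hjk'; omega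
  have h1 : m ≤ s[k] := hmin _ hks
  have h2 : s[k] ≤ m := hlast _ hmem
  rw [hm]
  simp
  omega

-- B's fold, once the best is a `some`, computes the running max of pvVals
theorem pv_fold_some (t : List Int) (s0 b0 : Int) :
    (t.foldl (fun (acc : Int × Option Int) x =>
      let sum := acc.1 + x
      let v := x * sum
      (sum, match acc.2 with
            | none => some v
            | some b => some (if v > b then v else b))) (s0, some b0)).2 =
      some ((pvVals s0 t).foldl max b0) := by
  induction t generalizing s0 b0 with
  | nil => rfl
  | cons x t ih =>
    simp only [List.foldl_cons, pvVals]
    rw [ih]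
    congr 1
    have : (if x * (s0 + x) > b0 then x * (s0 + x) else b0) = max b0 (x * (s0 + x)) := by
      rw [max_def]
      split_ifs <;> omega
    rw [this]

-- A's li list is exactly pvVals 0 s when s is the descending-sorted list
theorem pv_li_eq (s : List Int) (hp : s.Pairwise (fun a b => b ≤ a)) :
    (PySem.List.pyRange 1 ((s.length : Int) + 1) 1).foldl
      (fun li count =>
        let ll := PySem.List.slice s none (some count)
        li ++ [(PySem.List.min? ll (fun x => x)).getD 0 * ll.sum]) ([] : List Int) =
      pvVals 0 s := by
  rw [PySem.List.foldl_append_singleton_eq_map]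
  rw [PySem.List.pyRange_one]
  have hlen : ((s.length : Int) + 1 - 1).toNat = s.length := by omega
  rw [hlen]
  apply List.ext_getElem
  · simp [pvVals_length]
  · intro k h1 h2
    have hk : k < s.length := by simpa using h1
    simp only [List.nil_append, List.map_map, List.getElem_map, List.getElem_range,
      Function.comp]
    rw [pvVals_getElem 0 s k hk]
    have hb : (0 : Int) ≤ 1 + (k : Int) := by omega
    rw [PySem.List.slice_to s hb]
    have ht : ((1 : Int) + (k : Int)).toNat = k + 1 := by omega
    rw [ht, pv_min_take s hp k hk]
    ring_nf

-- ===== VERDICT (by name: the statement is the Claim_ definition above) =====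
theorem min_sum_max_spec : Claim_equal_min_sum_max := by
  intro l _ hpre
  unfold Spec_min_sum_max min_sum_max min_sum_max_alt
  set s := PySem.List.sorted l (fun x => x) true with hs
  have hlen : s.length = l.length := PySem.List.length_sorted _ _ _
  have hsne : s ≠ [] := by
    intro h
    exact hpre ((PySem.List.sorted_eq_nil_iff _ _ _).mp h)
  have hp : s.Pairwise (fun a b => b ≤ a) := PySem.List.sorted_pairwise_rev _ _
  simp only
  rw [hlen.symm, pv_li_eq s hp]
  cases hsv : s with
  | nil => exact absurd hsv hsne
  | cons x t =>
    simp only [pvVals, List.foldl_cons]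
    rw [pv_fold_some]
    rw [PySem.List.max?_id_cons]
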